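-- pv_equiv track=rewrite | github.com/nathan29849/TIL | 03_Python/Study/03_Python/Study/그리디/백준_슬라임합치기.py | slime
-- ===== SOURCE A (Python) =====
-- from collections import deque
--
-- def slime(n, slimes):
--     slimes.sort(reverse=True)   # 큰 순서대로 정렬하기
--
--     deq = deque()
--     for i in range(n):
--         deq.append(slimes[i])
--
--     result = 0  # 얻는 점수
--
--     while (len(deq) > 1):
--         x = deq.popleft()
--         y = deq.popleft()
--         result += x*y   # 곱한 만큼 점수로 추가
--         deq.appendleft(x+y) # 합친 슬라임은 다시 deq에 집어넣기
--
--     return result   # 점수 반환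
-- ===== SOURCE B (Python) =====
-- def slime(n, slimes):
--     slimes.sort(reverse=True)   # keep the in-place sort A performs
--     s = 0
--     sq = 0
--     for i in range(n):
--         v = slimes[i]
--         s += v
--         sq += v * v
--     return (s * s - sq) // 2
-- ===== Notes on version B (the rewrite author's own statement) =====
-- stated objective: faster
-- what changed: Replaces the deque pair-merging loop by a single accumulation of sum and sum of squares over the first n elements, returning the closed form (s*s - sq)//2 for the sum of all pairwise products.
import Mathlib
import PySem

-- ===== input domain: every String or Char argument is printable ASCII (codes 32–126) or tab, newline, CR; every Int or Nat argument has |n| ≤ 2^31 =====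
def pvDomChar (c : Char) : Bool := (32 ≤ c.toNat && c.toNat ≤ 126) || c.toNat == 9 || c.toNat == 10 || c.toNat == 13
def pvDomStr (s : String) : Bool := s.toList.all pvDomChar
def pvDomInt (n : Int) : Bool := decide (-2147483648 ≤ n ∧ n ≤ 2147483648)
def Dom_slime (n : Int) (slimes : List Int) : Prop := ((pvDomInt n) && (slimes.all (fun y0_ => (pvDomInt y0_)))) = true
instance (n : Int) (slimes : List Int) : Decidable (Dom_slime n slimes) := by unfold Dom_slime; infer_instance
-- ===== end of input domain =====

-- B replaces A's deque pair-merging loop by one accumulation of sum and sum of squares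
-- over the first n sorted elements, returning the closed form (s*s - sq)//2; the in-place
-- sort of the argument is kept (equivalence proved is about the return value).


-- ===== PORT A =====
-- while len(deq) > 1: x = popleft; y = popleft; result += x*y; appendleft(x+y)
def mergeLoop : List Int → Int → Int
  | x :: y :: rest, result => mergeLoop ((x + y) :: rest) (result + x * y)
  | _, result => result
  termination_by deq _ => deq.length
  decreasing_by simp

def slime (n : Int) (slimes : List Int) : Int :=
  let srt := PySem.List.sorted slimes (fun x => x) true
  -- for i in range(n): deq.append(slimes[i])  (none = IndexError, outside Pre_)
  let deq? := (PySem.List.pyRange 0 n 1).foldl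
      (fun acc i =>
        match acc, PySem.List.pyGet? srt i with
        | some d, some v => some (d ++ [v])
        | _, _ => none) (some ([] : List Int))
  match deq? with
  | some deq => mergeLoop deq 0
  | none => 0

-- ===== PORT B =====
def slime_alt (n : Int) (slimes : List Int) : Int :=
  let srt := PySem.List.sorted slimes (fun x => x) true
  -- for i in range(n): v = slimes[i]; s += v; sq += v*v
  let acc? := (PySem.List.pyRange 0 n 1).foldl
      (fun acc i =>
        match acc with
        | some (s, sq) => (PySem.List.pyGet? srt i).map (fun v => (s + v, sq + v * v))
        | none => none) (some ((0 : Int), (0 : Int)))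
  match acc? with
  | some (s, sq) => PySem.Int.floordiv (s * s - sq) 2
  | none => 0

-- ===== PRECONDITION & SPEC =====
-- Pre_ excludes n > len(slimes), on which the Python A raises IndexError (so does B).
def Pre_slime (n : Int) (slimes : List Int) : Prop := n ≤ (slimes.length : Int)
instance (n : Int) (slimes : List Int) : Decidable (Pre_slime n slimes) := by unfold Pre_slime; infer_instance
def pvWitness_slime : Int × List Int := (3, [1, 2, 3])

def Spec_slime (n : Int) (slimes : List Int) (out : Int) : Prop := out = slime_alt n slimes
instance (n : Int) (slimes : List Int) (out : Int) : Decidable (Spec_slime n slimes out) := by unfold Spec_slime; infer_instance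

-- ===== CLAIM (what is proved, stated in full; the proofs are below) =====
def Claim_equal_slime : Prop := ∀ (n : Int) (slimes : List Int), Dom_slime n slimes → Pre_slime n slimes → Spec_slime n slimes (slime n slimes)

-- ===== LEMMAS AND PROOFS =====

theorem foldA_none (srt : List Int) (r : List Int) :
    r.foldl (fun acc i =>
        match acc, PySem.List.pyGet? srt i with
        | some d, some v => some (d ++ [v])
        | _, _ => none) (none : Option (List Int)) = none := by
  induction r with
  | nil => rfl
  | cons i r ih => simpa using ih

theorem foldB_none (srt : List Int) (r : List Int) :
    r.foldl (fun acc i =>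
        match acc with
        | some (s, sq) => (PySem.List.pyGet? srt i).map (fun v => (s + v, sq + v * v))
        | none => none) (none : Option (Int × Int)) = none := by
  induction r with
  | nil => rfl
  | cons i r ih => simpa using ih

theorem foldA_eq (srt : List Int) (r : List Int) : ∀ d : List Int,
    r.foldl (fun acc i =>
        match acc, PySem.List.pyGet? srt i with
        | some d, some v => some (d ++ [v])
        | _, _ => none) (some d)
      = (r.mapM (PySem.List.pyGet? srt)).map (d ++ ·) := by
  induction r with
  | nil => intro d; simp
  | cons i r ih =>
    intro d
    simp only [List.foldl_cons, List.mapM_cons]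
    cases h : PySem.List.pyGet? srt i with
    | none => simp [foldA_none]
    | some v =>
      rw [ih (d ++ [v])]
      cases hr : r.mapM (PySem.List.pyGet? srt) <;> simp

theorem foldB_eq (srt : List Int) (r : List Int) : ∀ s sq : Int,
    r.foldl (fun acc i =>
        match acc with
        | some (s, sq) => (PySem.List.pyGet? srt i).map (fun v => (s + v, sq + v * v))
        | none => none) (some (s, sq))
      = (r.mapM (PySem.List.pyGet? srt)).map
          (fun vs => (s + vs.sum, sq + (vs.map (fun v => v * v)).sum)) := by
  induction r with
  | nil => intro s sq; simp
  | cons i r ih =>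
    intro s sq
    simp only [List.foldl_cons, List.mapM_cons]
    cases h : PySem.List.pyGet? srt i with
    | none => simp [foldB_none]
    | some v =>
      simp only [Option.map_some]
      rw [ih (s + v) (sq + v * v)]
      cases hr : r.mapM (PySem.List.pyGet? srt) with
      | none => simp
      | some vs => simp; constructor <;> ring

theorem mergeLoop_closed_aux (N : Nat) : ∀ (vs : List Int), vs.length ≤ N → ∀ (acc : Int),
    2 * mergeLoop vs acc = 2 * acc + vs.sum * vs.sum - (vs.map (fun v => v * v)).sum := by
  induction N with
  | zero =>
    intro vs h acc
    match vs with
    | [] => simp [mergeLoop]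
  | succ N ih =>
    intro vs h acc
    match vs with
    | [] => simp [mergeLoop]
    | [x] => simp [mergeLoop]
    | x :: y :: rest =>
      rw [mergeLoop, ih ((x + y) :: rest) (by simp at h ⊢; omega)]
      simp [List.sum_cons]
      ring

theorem mergeLoop_closed (vs : List Int) (acc : Int) :
    2 * mergeLoop vs acc = 2 * acc + vs.sum * vs.sum - (vs.map (fun v => v * v)).sum :=
  mergeLoop_closed_aux vs.length vs le_rfl acc

theorem merge_eq_closed (vs : List Int) :
    mergeLoop vs 0 = PySem.Int.floordiv (vs.sum * vs.sum - (vs.map (fun v => v * v)).sum) 2 := by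
  have h := mergeLoop_closed vs 0
  rw [eq_comm, PySem.Int.floordiv_eq_iff_of_pos (by norm_num)]
  omega

-- ===== VERDICT (by name: the statement is the Claim_ definition above) =====
theorem slime_spec : Claim_equal_slime := by
  intro n slimes _ _
  unfold Spec_slime
  simp only [slime, slime_alt]
  rw [foldA_eq, foldB_eq]
  cases hr : (PySem.List.pyRange 0 n 1).mapM (PySem.List.pyGet? (PySem.List.sorted slimes (fun x => x) true)) with
  | none => simp
  | some vs => simp [merge_eq_closed]
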